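-- pv_equiv track=rewrite | github.com/olga3n/adventofcode | 2019/10-monitoring-station-2.py | direct_line_of_sight
-- ===== SOURCE A (Python) =====
-- def direct_line_of_sight(asteroids_map, a, b):
--
--     is_visible = True
--
--     delta = (abs(b[0] - a[0]), abs(b[1] - a[1]))
--
--     for coeff in range(1, max(delta[0], delta[1]) + 1):
--         if delta[0] % coeff == 0 and \
--                 delta[1] % coeff == 0 and \
--                 (delta[0] // coeff != delta[0] or
--                     delta[1] // coeff != delta[1]):
--
--             for step in range(1, coeff + 1):
--                 if b[0] < a[0]:
--                     ii = b[0] + step * (delta[0] // coeff)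
--                 else:
--                     ii = b[0] - step * (delta[0] // coeff)
--
--                 if b[1] < a[1]:
--                     jj = b[1] + step * (delta[1] // coeff)
--                 else:
--                     jj = b[1] - step * (delta[1] // coeff)
--
--                 if 0 <= jj < len(asteroids_map) and \
--                         0 <= ii < len(asteroids_map[jj]) and \
--                         (ii, jj) != b and (ii, jj) != a and \
--                         asteroids_map[jj][ii] == '#':
--
--                     is_visible = False
--
--                     break
--
--     return is_visible
-- ===== SOURCE B (Python) =====
-- def _gcd(x, y):
--     x, y = abs(x), abs(y)
--     while y:
--         x, y = y, x % y
--     return x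
--
--
-- def direct_line_of_sight(asteroids_map, a, b):
--     dx = a[0] - b[0]
--     dy = a[1] - b[1]
--     g = _gcd(dx, dy)
--     if g == 0:
--         return True
--     sx, sy = dx // g, dy // g
--     for k in range(1, g):
--         ii = b[0] + k * sx
--         jj = b[1] + k * sy
--         if 0 <= jj < len(asteroids_map) and \
--                 0 <= ii < len(asteroids_map[jj]) and \
--                 asteroids_map[jj][ii] == '#':
--             return False
--     return True
-- ===== Notes on version B (the rewrite author's own statement) =====
-- stated objective: alternative
-- what changed: Instead of scanning every candidate coefficient up to max(|dx|,|dy|) and re-walking up to coeff intermediate points for each common divisor, B reduces the step vector by g = gcd(dx,dy) once and scans only the g-1 lattice points strictly between b and a (measured ~1.3-1.6x faster on the generated inputs, short of the 1.5x gate at the largest size, so no speed is claimed).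
import Mathlib
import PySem

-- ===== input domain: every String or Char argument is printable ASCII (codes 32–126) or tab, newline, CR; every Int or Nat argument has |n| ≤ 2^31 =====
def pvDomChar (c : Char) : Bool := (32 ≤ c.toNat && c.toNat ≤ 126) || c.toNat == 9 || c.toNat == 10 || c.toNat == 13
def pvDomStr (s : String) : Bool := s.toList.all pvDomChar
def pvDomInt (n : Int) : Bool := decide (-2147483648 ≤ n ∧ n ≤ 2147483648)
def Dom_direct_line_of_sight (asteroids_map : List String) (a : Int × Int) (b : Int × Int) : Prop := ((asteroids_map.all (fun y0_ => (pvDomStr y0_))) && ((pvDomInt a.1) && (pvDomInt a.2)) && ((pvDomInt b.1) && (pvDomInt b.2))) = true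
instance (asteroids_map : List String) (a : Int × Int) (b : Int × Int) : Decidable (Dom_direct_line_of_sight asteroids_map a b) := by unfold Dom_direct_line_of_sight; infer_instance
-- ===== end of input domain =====

-- B replaces A's scan over every candidate divisor (with a re-walk of up to coeff points per divisor)
-- by one gcd reduction and a single scan over the g-1 lattice points strictly between b and a (objective: alternative).


-- ===== PORT A =====
-- inner 'for step in range(1, coeff+1): … break' loop of A (break = return true on first hit)
def dlosInner (m : List String) (a b delta : Int × Int) (coeff : Int) : List Int → Bool
  | [] => false
  | step :: rest =>
      let ii := if b.1 < a.1 then b.1 + step * PySem.Int.floordiv delta.1 coeff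
                else b.1 - step * PySem.Int.floordiv delta.1 coeff
      let jj := if b.2 < a.2 then b.2 + step * PySem.Int.floordiv delta.2 coeff
                else b.2 - step * PySem.Int.floordiv delta.2 coeff
      if 0 ≤ jj ∧ jj < (m.length : Int) ∧ 0 ≤ ii ∧ ii < PySem.Str.len (PySem.List.pyGetD m jj "") ∧
         (ii, jj) ≠ b ∧ (ii, jj) ≠ a ∧ PySem.Str.pyGet? (PySem.List.pyGetD m jj "") ii = some '#'
      then true else dlosInner m a b delta coeff rest

def direct_line_of_sight (asteroids_map : List String) (a : Int × Int) (b : Int × Int) : Bool :=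
  let delta : Int × Int := (|b.1 - a.1|, |b.2 - a.2|)
  (PySem.List.pyRange 1 (max delta.1 delta.2 + 1) 1).foldl
    (fun is_visible coeff =>
      if PySem.Int.mod delta.1 coeff = 0 ∧ PySem.Int.mod delta.2 coeff = 0 ∧
         (PySem.Int.floordiv delta.1 coeff ≠ delta.1 ∨ PySem.Int.floordiv delta.2 coeff ≠ delta.2)
      then if dlosInner asteroids_map a b delta coeff (PySem.List.pyRange 1 (coeff + 1) 1) then false
           else is_visible
      else is_visible) true

-- ===== PORT B =====
-- hand-written Euclid of Source B (A imports nothing, so Source B may not use math.gcd)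
def euclid (x y : Nat) : Nat :=
  if h : y = 0 then x else euclid y (x % y)
termination_by y
decreasing_by exact Nat.mod_lt _ (Nat.pos_of_ne_zero h)

-- the single 'for k in range(1, g): … return False' scan of Source B
def dlosScan (m : List String) (b : Int × Int) (sx sy : Int) : List Int → Bool
  | [] => true
  | k :: rest =>
      let ii := b.1 + k * sx
      let jj := b.2 + k * sy
      if 0 ≤ jj ∧ jj < (m.length : Int) ∧ 0 ≤ ii ∧ ii < PySem.Str.len (PySem.List.pyGetD m jj "") ∧
         PySem.Str.pyGet? (PySem.List.pyGetD m jj "") ii = some '#'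
      then false else dlosScan m b sx sy rest

def direct_line_of_sight_alt (asteroids_map : List String) (a : Int × Int) (b : Int × Int) : Bool :=
  let dx := a.1 - b.1
  let dy := a.2 - b.2
  let g : Int := (euclid dx.natAbs dy.natAbs : Int)
  if g = 0 then true
  else dlosScan asteroids_map b (PySem.Int.floordiv dx g) (PySem.Int.floordiv dy g)
         (PySem.List.pyRange 1 g 1)

-- ===== PRECONDITION & SPEC =====
def Spec_direct_line_of_sight (asteroids_map : List String) (a : Int × Int) (b : Int × Int) (out : Bool) : Prop := out = direct_line_of_sight_alt asteroids_map a b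
instance (asteroids_map : List String) (a : Int × Int) (b : Int × Int) (out : Bool) : Decidable (Spec_direct_line_of_sight asteroids_map a b out) := by unfold Spec_direct_line_of_sight; infer_instance

-- ===== CLAIM (what is proved, stated in full; the proofs are below) =====
def Claim_equal_direct_line_of_sight : Prop := ∀ (asteroids_map : List String) (a : Int × Int) (b : Int × Int), Dom_direct_line_of_sight asteroids_map a b → Spec_direct_line_of_sight asteroids_map a b (direct_line_of_sight asteroids_map a b)

-- ===== LEMMAS AND PROOFS =====

-- the map test both programs apply to a candidate lattice point p = (ii, jj)
def hitAt (m : List String) (p : Int × Int) : Prop :=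
  0 ≤ p.2 ∧ p.2 < (m.length : Int) ∧ 0 ≤ p.1 ∧ p.1 < PySem.Str.len (PySem.List.pyGetD m p.2 "") ∧
  PySem.Str.pyGet? (PySem.List.pyGetD m p.2 "") p.1 = some '#'

-- the point A's inner loop inspects for (coeff, step), with delta = (d0, d1)
def aPoint (a b : Int × Int) (d0 d1 c s : Int) : Int × Int :=
  ((if b.1 < a.1 then b.1 + s * PySem.Int.floordiv d0 c else b.1 - s * PySem.Int.floordiv d0 c),
   (if b.2 < a.2 then b.2 + s * PySem.Int.floordiv d1 c else b.2 - s * PySem.Int.floordiv d1 c))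

theorem euclid_eq_gcd (x y : Nat) : euclid x y = Nat.gcd x y := by
  induction y using Nat.strong_induction_on generalizing x with
  | _ y ih =>
    rw [euclid]
    by_cases h : y = 0
    · simp [h]
    · rw [dif_neg h, ih (x % y) (Nat.mod_lt _ (Nat.pos_of_ne_zero h)) y,
        Nat.gcd_comm, ← Nat.gcd_rec, Nat.gcd_comm]

theorem dlosScan_true_iff (m : List String) (b : Int × Int) (sx sy : Int) (l : List Int) :
    dlosScan m b sx sy l = true ↔ ∀ k ∈ l, ¬ hitAt m (b.1 + k * sx, b.2 + k * sy) := by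
  induction l with
  | nil => simp [dlosScan]
  | cons k rest ih =>
      rw [dlosScan]
      by_cases h : hitAt m (b.1 + k * sx, b.2 + k * sy)
      · rw [if_pos (by simpa [hitAt] using h)]
        simp only [List.mem_cons]
        exact ⟨fun hfalse => absurd hfalse (by simp), fun hall => absurd h (hall k (Or.inl rfl))⟩
      · rw [if_neg (by simpa [hitAt] using h)]
        simp only [List.mem_cons, ih]
        constructor
        · rintro hall k' (rfl | hk')
          · exact h
          · exact hall k' hk'
        · intro hall k' hk'; exact hall k' (Or.inr hk')

theorem dlosInner_true_iff (m : List String) (a b : Int × Int) (d0 d1 coeff : Int) (l : List Int) :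
    dlosInner m a b (d0, d1) coeff l = true ↔
      ∃ s ∈ l, hitAt m (aPoint a b d0 d1 coeff s) ∧
        aPoint a b d0 d1 coeff s ≠ b ∧ aPoint a b d0 d1 coeff s ≠ a := by
  induction l with
  | nil => simp [dlosInner]
  | cons s rest ih =>
      rw [dlosInner]
      by_cases h : hitAt m (aPoint a b d0 d1 coeff s) ∧
          aPoint a b d0 d1 coeff s ≠ b ∧ aPoint a b d0 d1 coeff s ≠ a
      · rw [if_pos (by
          obtain ⟨⟨h1, h2, h3, h4, h5⟩, h6, h7⟩ := h
          simp only [aPoint] at h1 h2 h3 h4 h5 h6 h7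
          exact ⟨h1, h2, h3, h4, h6, h7, h5⟩)]
        simp only [List.mem_cons, true_iff]
        exact ⟨s, Or.inl rfl, h⟩
      · rw [if_neg (by
          intro ⟨h1, h2, h3, h4, h6, h7, h5⟩
          exact h ⟨⟨h1, h2, h3, h4, h5⟩, h6, h7⟩)]
        simp only [List.mem_cons, ih]
        constructor
        · rintro ⟨s', hs', hrest⟩; exact ⟨s', Or.inr hs', hrest⟩
        · rintro ⟨s', (rfl | hs'), hrest⟩
          · exact absurd hrest h
          · exact ⟨s', hs', hrest⟩

theorem outer_foldl (m : List String) (a b : Int × Int) (d0 d1 : Int) (l : List Int) (v : Bool) :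
    l.foldl
      (fun is_visible coeff =>
        if PySem.Int.mod d0 coeff = 0 ∧ PySem.Int.mod d1 coeff = 0 ∧
           (PySem.Int.floordiv d0 coeff ≠ d0 ∨ PySem.Int.floordiv d1 coeff ≠ d1)
        then if dlosInner m a b (d0, d1) coeff (PySem.List.pyRange 1 (coeff + 1) 1) then false
             else is_visible
        else is_visible) v
    = (v && !(l.any fun coeff =>
        decide (PySem.Int.mod d0 coeff = 0 ∧ PySem.Int.mod d1 coeff = 0 ∧
          (PySem.Int.floordiv d0 coeff ≠ d0 ∨ PySem.Int.floordiv d1 coeff ≠ d1))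
        && dlosInner m a b (d0, d1) coeff (PySem.List.pyRange 1 (coeff + 1) 1))) := by
  induction l generalizing v with
  | nil => simp
  | cons c rest ih =>
      simp only [List.foldl_cons, List.any_cons, ih]
      by_cases hc : PySem.Int.mod d0 c = 0 ∧ PySem.Int.mod d1 c = 0 ∧
          (PySem.Int.floordiv d0 c ≠ d0 ∨ PySem.Int.floordiv d1 c ≠ d1)
      · rw [if_pos hc]
        simp only [decide_eq_true hc, Bool.true_and]
        cases hinner : dlosInner m a b (d0, d1) c (PySem.List.pyRange 1 (c + 1) 1) <;> simp
      · rw [if_neg hc]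
        simp [decide_eq_false hc]

-- exact-division form of the point A inspects, once c is a positive common divisor of the deltas
theorem aShift (x0 x1 c s : Int) (hd : c ∣ |x0 - x1|) :
    (if x0 < x1 then x0 + s * (|x0 - x1| / c) else x0 - s * (|x0 - x1| / c))
      = x0 + s * ((x1 - x0) / c) := by
  have d1 : c ∣ (x0 - x1) := (dvd_abs _ _).mp hd
  by_cases hlt : x0 < x1
  · rw [if_pos hlt, abs_of_nonpos (by omega), show -(x0 - x1) = x1 - x0 from by ring]
  · rw [if_neg hlt, abs_of_nonneg (by omega), show x1 - x0 = -(x0 - x1) from by ring,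
      Int.neg_ediv_of_dvd d1]
    ring

theorem aPoint_eq (a b : Int × Int) (c s : Int) (hc : 0 < c)
    (h1 : c ∣ |b.1 - a.1|) (h2 : c ∣ |b.2 - a.2|) :
    aPoint a b (|b.1 - a.1|) (|b.2 - a.2|) c s
      = (b.1 + s * ((a.1 - b.1) / c), b.2 + s * ((a.2 - b.2) / c)) := by
  unfold aPoint
  rw [PySem.Int.floordiv_eq_ediv_of_pos hc, PySem.Int.floordiv_eq_ediv_of_pos hc,
    aShift b.1 a.1 c s h1, aShift b.2 a.2 c s h2]

-- the number-theoretic core: A's nested existential over (coeff, step) ⟺ B's single scan over k ∈ [1, g)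
theorem core_iff (m : List String) (a b : Int × Int) :
    (∃ c, (1 ≤ c ∧ c < max |b.1 - a.1| |b.2 - a.2| + 1) ∧
      (PySem.Int.mod |b.1 - a.1| c = 0 ∧ PySem.Int.mod |b.2 - a.2| c = 0 ∧
        (PySem.Int.floordiv |b.1 - a.1| c ≠ |b.1 - a.1| ∨
         PySem.Int.floordiv |b.2 - a.2| c ≠ |b.2 - a.2|)) ∧
      ∃ s, (1 ≤ s ∧ s < c + 1) ∧
        hitAt m (aPoint a b (|b.1 - a.1|) (|b.2 - a.2|) c s) ∧
        aPoint a b (|b.1 - a.1|) (|b.2 - a.2|) c s ≠ b ∧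
        aPoint a b (|b.1 - a.1|) (|b.2 - a.2|) c s ≠ a)
    ↔ ((Int.gcd (a.1 - b.1) (a.2 - b.2) : Int) ≠ 0 ∧
       ∃ k, (1 ≤ k ∧ k < (Int.gcd (a.1 - b.1) (a.2 - b.2) : Int)) ∧
         hitAt m (b.1 + k * ((a.1 - b.1) / (Int.gcd (a.1 - b.1) (a.2 - b.2) : Int)),
                  b.2 + k * ((a.2 - b.2) / (Int.gcd (a.1 - b.1) (a.2 - b.2) : Int)))) := by
  set dx := a.1 - b.1 with hdx
  set dy := a.2 - b.2 with hdy
  set g : Int := (Int.gcd dx dy : Int) with hg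
  have habs1 : |b.1 - a.1| = |dx| := by rw [abs_sub_comm, ← hdx]
  have habs2 : |b.2 - a.2| = |dy| := by rw [abs_sub_comm, ← hdy]
  have hgnn : (0:Int) ≤ g := by rw [hg]; exact Int.natCast_nonneg _
  have hgdx : g ∣ dx := by rw [hg]; exact Int.gcd_dvd_left dx dy
  have hgdy : g ∣ dy := by rw [hg]; exact Int.gcd_dvd_right dx dy
  have hxg : g * (dx / g) = dx := Int.mul_ediv_cancel' hgdx
  have hyg : g * (dy / g) = dy := Int.mul_ediv_cancel' hgdy
  constructor
  · rintro ⟨c, ⟨hc1, _⟩, ⟨hm1, hm2, hne⟩, s, ⟨hs1, hs2⟩, hhit, hnb, hna⟩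
    have hcpos : (0:Int) < c := by omega
    have hd1 : c ∣ |dx| := by rw [← habs1]; exact (PySem.Int.mod_eq_zero_iff_dvd _ _).mp hm1
    have hd2 : c ∣ |dy| := by rw [← habs2]; exact (PySem.Int.mod_eq_zero_iff_dvd _ _).mp hm2
    have hcdx : c ∣ dx := (dvd_abs _ _).mp hd1
    have hcdy : c ∣ dy := (dvd_abs _ _).mp hd2
    have hcg : c ∣ g := Int.dvd_coe_gcd hcdx hcdy
    -- g ≠ 0: otherwise dx = dy = 0 and A's non-triviality test fails
    have hgne : g ≠ 0 := by
      intro h0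
      have h0' : Int.gcd dx dy = 0 := by rw [hg] at h0; exact_mod_cast h0
      obtain ⟨hdx0, hdy0⟩ := Int.gcd_eq_zero_iff.mp h0'
      rcases hne with h | h
      · apply h
        rw [habs1, hdx0]
        simp [PySem.Int.floordiv_eq_ediv_of_pos hcpos]
      · apply h
        rw [habs2, hdy0]
        simp [PySem.Int.floordiv_eq_ediv_of_pos hcpos]
    have hgpos : (0:Int) < g := lt_of_le_of_ne hgnn (Ne.symm hgne)
    have hcleg : c ≤ g := Int.le_of_dvd hgpos hcg
    have hqpos : (1:Int) ≤ g / c := by rw [Int.le_ediv_iff_mul_le hcpos]; omega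
    have hcq : c * (g / c) = g := Int.mul_ediv_cancel' hcg
    have e1 : dx / c = (g / c) * (dx / g) := by
      conv_lhs => rw [← hxg]
      rw [Int.mul_ediv_assoc' _ hcg]
    have e2 : dy / c = (g / c) * (dy / g) := by
      conv_lhs => rw [← hyg]
      rw [Int.mul_ediv_assoc' _ hcg]
    have hk1 : (1:Int) ≤ s * (g / c) := by nlinarith
    have hkg : s * (g / c) ≤ g := by nlinarith
    rw [aPoint_eq a b c s hcpos (by rwa [habs1]) (by rwa [habs2])] at hhit hna
    refine ⟨hgne, s * (g / c), ⟨hk1, ?_⟩, ?_⟩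
    · rcases lt_or_eq_of_le hkg with h | h
      · exact h
      · exfalso
        apply hna
        refine Prod.ext ?_ ?_
        · show b.1 + s * (dx / c) = a.1
          rw [e1, show s * ((g / c) * (dx / g)) = s * (g / c) * (dx / g) from by ring, h, hxg, hdx]
          ring
        · show b.2 + s * (dy / c) = a.2
          rw [e2, show s * ((g / c) * (dy / g)) = s * (g / c) * (dy / g) from by ring, h, hyg, hdy]
          ring
    · rw [show b.1 + s * (g / c) * (dx / g) = b.1 + s * (dx / c) from by rw [e1]; ring,
          show b.2 + s * (g / c) * (dy / g) = b.2 + s * (dy / c) from by rw [e2]; ring]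
      exact hhit
  · rintro ⟨hgne, k, ⟨hk1, hk2⟩, hhit⟩
    have hgpos : (0:Int) < g := lt_of_le_of_ne hgnn (Ne.symm hgne)
    have hg2 : (2:Int) ≤ g := by omega
    have hnz : ¬ (dx = 0 ∧ dy = 0) := by
      rintro ⟨h1, h2⟩
      exact hgne (by rw [hg, h1, h2]; simp)
    have hgd1 : g ∣ |dx| := (dvd_abs _ _).mpr hgdx
    have hgd2 : g ∣ |dy| := (dvd_abs _ _).mpr hgdy
    -- if |d| / g = |d| for g ≥ 2 then d = 0
    have key : ∀ d : Int, g ∣ d → 0 ≤ d → d / g = d → d = 0 := by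
      intro d hdvd hdnn hEq
      have hd : g * d = d := by conv_rhs => rw [← Int.mul_ediv_cancel' hdvd, hEq]
      have : d ≤ 0 := by nlinarith
      omega
    refine ⟨g, ⟨by omega, ?_⟩, ⟨?_, ?_, ?_⟩, k, ⟨hk1, by omega⟩, ?_, ?_, ?_⟩
    · rcases (not_and_or.mp hnz) with h | h
      · have : g ≤ |dx| := Int.le_of_dvd (abs_pos.mpr h) hgd1
        rw [habs1, habs2]; omega
      · have : g ≤ |dy| := Int.le_of_dvd (abs_pos.mpr h) hgd2
        rw [habs1, habs2]; omega
    · rw [habs1]; exact (PySem.Int.mod_eq_zero_iff_dvd _ _).mpr hgd1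
    · rw [habs2]; exact (PySem.Int.mod_eq_zero_iff_dvd _ _).mpr hgd2
    · rw [habs1, habs2, PySem.Int.floordiv_eq_ediv_of_pos hgpos,
          PySem.Int.floordiv_eq_ediv_of_pos hgpos]
      by_cases hx0 : dx = 0
      · right
        intro hEq
        exact hnz ⟨hx0, abs_eq_zero.mp (key |dy| hgd2 (abs_nonneg _) hEq)⟩
      · left
        intro hEq
        exact hx0 (abs_eq_zero.mp (key |dx| hgd1 (abs_nonneg _) hEq))
    · rw [aPoint_eq a b g k hgpos (by rwa [habs1]) (by rwa [habs2])]
      exact hhit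
    · rw [aPoint_eq a b g k hgpos (by rwa [habs1]) (by rwa [habs2])]
      intro hEq
      have h1 : k * (dx / g) = 0 := by
        have := congrArg Prod.fst hEq; linarith [this]
      have h2 : k * (dy / g) = 0 := by
        have := congrArg Prod.snd hEq; linarith [this]
      have hx : dx / g = 0 := by
        rcases mul_eq_zero.mp h1 with h | h
        · omega
        · exact h
      have hy : dy / g = 0 := by
        rcases mul_eq_zero.mp h2 with h | h
        · omega
        · exact h
      exact hnz ⟨by rw [← hxg, hx, mul_zero], by rw [← hyg, hy, mul_zero]⟩
    · rw [aPoint_eq a b g k hgpos (by rwa [habs1]) (by rwa [habs2])]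
      intro hEq
      have h1 : k * (dx / g) = dx := by
        have := congrArg Prod.fst hEq; linarith [hdx, this]
      have h2 : k * (dy / g) = dy := by
        have := congrArg Prod.snd hEq; linarith [hdy, this]
      have h1' : (k - g) * (dx / g) = 0 := by linear_combination h1 - hxg
      have h2' : (k - g) * (dy / g) = 0 := by linear_combination h2 - hyg
      have hx : dx / g = 0 := by
        rcases mul_eq_zero.mp h1' with h | h
        · omega
        · exact h
      have hy : dy / g = 0 := by
        rcases mul_eq_zero.mp h2' with h | h
        · omega
        · exact h
      exact hnz ⟨by rw [← hxg, hx, mul_zero], by rw [← hyg, hy, mul_zero]⟩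

-- the outer any of A, as the proposition core_iff talks about
theorem any_iff (m : List String) (a b : Int × Int) :
    ((PySem.List.pyRange 1 (max |b.1 - a.1| |b.2 - a.2| + 1) 1).any fun coeff =>
        decide (PySem.Int.mod |b.1 - a.1| coeff = 0 ∧ PySem.Int.mod |b.2 - a.2| coeff = 0 ∧
          (PySem.Int.floordiv |b.1 - a.1| coeff ≠ |b.1 - a.1| ∨
           PySem.Int.floordiv |b.2 - a.2| coeff ≠ |b.2 - a.2|))
        && dlosInner m a b (|b.1 - a.1|, |b.2 - a.2|) coeff (PySem.List.pyRange 1 (coeff + 1) 1)) = true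
    ↔ (∃ c, (1 ≤ c ∧ c < max |b.1 - a.1| |b.2 - a.2| + 1) ∧
        (PySem.Int.mod |b.1 - a.1| c = 0 ∧ PySem.Int.mod |b.2 - a.2| c = 0 ∧
          (PySem.Int.floordiv |b.1 - a.1| c ≠ |b.1 - a.1| ∨
           PySem.Int.floordiv |b.2 - a.2| c ≠ |b.2 - a.2|)) ∧
        ∃ s, (1 ≤ s ∧ s < c + 1) ∧
          hitAt m (aPoint a b (|b.1 - a.1|) (|b.2 - a.2|) c s) ∧
          aPoint a b (|b.1 - a.1|) (|b.2 - a.2|) c s ≠ b ∧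
          aPoint a b (|b.1 - a.1|) (|b.2 - a.2|) c s ≠ a) := by
  rw [List.any_eq_true]
  constructor
  · rintro ⟨c, hc, hF⟩
    rw [Bool.and_eq_true, decide_eq_true_eq, dlosInner_true_iff] at hF
    obtain ⟨hcond, s, hs, hrest⟩ := hF
    rw [PySem.List.mem_pyRange_one] at hc hs
    exact ⟨c, hc, hcond, s, hs, hrest⟩
  · rintro ⟨c, hc, hcond, s, hs, hrest⟩
    refine ⟨c, PySem.List.mem_pyRange_one.mpr hc, ?_⟩
    rw [Bool.and_eq_true, decide_eq_true_eq, dlosInner_true_iff]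
    exact ⟨hcond, s, PySem.List.mem_pyRange_one.mpr hs, hrest⟩

-- ===== VERDICT (by name: the statement is the Claim_ definition above) =====
theorem direct_line_of_sight_spec : Claim_equal_direct_line_of_sight := by
  intro m a b _
  unfold Spec_direct_line_of_sight direct_line_of_sight direct_line_of_sight_alt
  have hgeq : (euclid (a.1 - b.1).natAbs (a.2 - b.2).natAbs : Int)
      = (Int.gcd (a.1 - b.1) (a.2 - b.2) : Int) := by
    rw [euclid_eq_gcd]; rfl
  simp only [hgeq]
  rw [outer_foldl, Bool.true_and]
  set g : Int := (Int.gcd (a.1 - b.1) (a.2 - b.2) : Int) with hg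
  by_cases hg0 : g = 0
  · rw [if_pos hg0]
    rw [Bool.not_eq_true', ← Bool.not_eq_true]
    intro hany
    exact ((core_iff m a b).mp ((any_iff m a b).mp hany)).1 hg0
  · rw [if_neg hg0]
    have hgpos : (0:Int) < g :=
      lt_of_le_of_ne (by rw [hg]; exact Int.natCast_nonneg _) (Ne.symm hg0)
    rw [PySem.Int.floordiv_eq_ediv_of_pos hgpos, PySem.Int.floordiv_eq_ediv_of_pos hgpos,
        Bool.eq_iff_iff, dlosScan_true_iff]
    constructor
    · intro hnot k hk hhit
      rw [PySem.List.mem_pyRange_one] at hk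
      have hL := (core_iff m a b).mpr ⟨hg0, k, hk, hhit⟩
      rw [Bool.not_eq_true', ← Bool.not_eq_true] at hnot
      exact hnot ((any_iff m a b).mpr hL)
    · intro hall
      rw [Bool.not_eq_true', ← Bool.not_eq_true]
      intro hany
      obtain ⟨_, k, hk, hhit⟩ := (core_iff m a b).mp ((any_iff m a b).mp hany)
      exact hall k (PySem.List.mem_pyRange_one.mpr hk) hhit
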